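-- pv_equiv track=rewrite | github.com/aeronjl/behavtaskatlas | src/behavtaskatlas/model_layer.py | _ordered_comparison_scopes
-- ===== SOURCE A (Python) =====
-- from collections.abc import Iterable, Mapping
--
-- MODEL_COMPARISON_SCOPE_DEFINITIONS: dict[str, dict[str, str]] = {
--     "direct_choice": {
--         "label": "direct choice",
--         "description": (
--             "Choice-proportion likelihoods fit to the same finding-level "
--             "response curve."
--         ),
--     },
--     "joint_choice_rt": {
--         "label": "joint choice + RT",
--         "description": (
--             "DDM fit whose AIC combines the psychometric likelihood with a "
--             "paired aggregate chronometric term."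
--         ),
--     },
--     "chronometric_summary": {
--         "label": "chronometric summary",
--         "description": (
--             "Descriptive median-RT-by-strength fit over chronometric summary "
--             "points."
--         ),
--     },
--     "accuracy_summary": {
--         "label": "accuracy summary",
--         "description": (
--             "Descriptive p(correct)-by-strength fit over accuracy summary "
--             "points."
--         ),
--     },
--     "condition_rate": {
--         "label": "condition-rate baseline",
--         "description": (
--             "Condition-invariant Bernoulli response-rate baseline for "
--             "categorical hit-rate findings."
--         ),
--     },
--     "click_summary": {
--         "label": "click summary",
--         "description": (
--             "Click-accumulator fit over curated click summary fields rather "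
--             "than a full raw-event likelihood."
--         ),
--     },
-- }
--
-- def _ordered_comparison_scopes(scopes: Iterable[str]) -> list[str]:
--     scope_set = set(scopes)
--     ordered = [
--         scope
--         for scope in MODEL_COMPARISON_SCOPE_DEFINITIONS
--         if scope in scope_set
--     ]
--     return ordered + sorted(scope_set - set(ordered))
-- ===== SOURCE B (Python) =====
-- from collections.abc import Iterable
--
--
-- MODEL_COMPARISON_SCOPE_DEFINITIONS: dict[str, dict[str, str]] = {
--     "direct_choice": {
--         "label": "direct choice",
--         "description": (
--             "Choice-proportion likelihoods fit to the same finding-level "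
--             "response curve."
--         ),
--     },
--     "joint_choice_rt": {
--         "label": "joint choice + RT",
--         "description": (
--             "DDM fit whose AIC combines the psychometric likelihood with a "
--             "paired aggregate chronometric term."
--         ),
--     },
--     "chronometric_summary": {
--         "label": "chronometric summary",
--         "description": (
--             "Descriptive median-RT-by-strength fit over chronometric summary "
--             "points."
--         ),
--     },
--     "accuracy_summary": {
--         "label": "accuracy summary",
--         "description": (
--             "Descriptive p(correct)-by-strength fit over accuracy summary "
--             "points."
--         ),
--     },
--     "condition_rate": {
--         "label": "condition-rate baseline",
--         "description": (
--             "Condition-invariant Bernoulli response-rate baseline for "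
--             "categorical hit-rate findings."
--         ),
--     },
--     "click_summary": {
--         "label": "click summary",
--         "description": (
--             "Click-accumulator fit over curated click summary fields rather "
--             "than a full raw-event likelihood."
--         ),
--     },
-- }
--
-- _SCOPE_PRIORITY = {
--     name: index
--     for index, name in enumerate(MODEL_COMPARISON_SCOPE_DEFINITIONS)
-- }
--
--
-- def _ordered_comparison_scopes(scopes: Iterable[str]) -> list[str]:
--     fallback = len(MODEL_COMPARISON_SCOPE_DEFINITIONS)
--     return sorted(set(scopes), key=lambda s: (_SCOPE_PRIORITY.get(s, fallback), s))
-- ===== Notes on version B (the rewrite author's own statement) =====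
-- stated objective: simpler
-- what changed: Replaces A's filter pass over the canonical dict plus set-difference plus separate sort of the remainder by a single sorted() over the deduplicated scopes with a composite key (priority index from a precomputed dict, name), unknown scopes falling back to len(defs) so they sort after all known ones.
import Mathlib
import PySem

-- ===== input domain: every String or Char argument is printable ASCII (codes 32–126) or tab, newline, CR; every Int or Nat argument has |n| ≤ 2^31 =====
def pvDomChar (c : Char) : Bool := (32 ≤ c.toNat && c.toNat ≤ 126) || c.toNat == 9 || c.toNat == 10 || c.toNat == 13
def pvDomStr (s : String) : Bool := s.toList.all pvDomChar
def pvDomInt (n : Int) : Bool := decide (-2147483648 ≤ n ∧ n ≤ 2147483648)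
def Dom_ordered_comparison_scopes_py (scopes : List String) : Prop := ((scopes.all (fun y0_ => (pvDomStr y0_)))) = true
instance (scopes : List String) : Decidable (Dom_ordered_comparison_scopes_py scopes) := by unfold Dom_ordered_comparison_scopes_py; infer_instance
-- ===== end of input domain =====

-- B replaces A's filter-pass + set-difference + tail sort by one keyed sort of the
-- deduplicated scopes under the composite key (priority index, name); objective: simpler.


-- module-level constant MODEL_COMPARISON_SCOPE_DEFINITIONS (shared context of A and B)
def pvScopeDefs : PySem.Dict String (PySem.Dict String String) :=
  PySem.Dict.ofList
  [ ("direct_choice",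
      PySem.Dict.ofList [("label", "direct choice"),
       ("description", "Choice-proportion likelihoods fit to the same finding-level response curve.")]),
    ("joint_choice_rt",
      PySem.Dict.ofList [("label", "joint choice + RT"),
       ("description", "DDM fit whose AIC combines the psychometric likelihood with a paired aggregate chronometric term.")]),
    ("chronometric_summary",
      PySem.Dict.ofList [("label", "chronometric summary"),
       ("description", "Descriptive median-RT-by-strength fit over chronometric summary points.")]),
    ("accuracy_summary",
      PySem.Dict.ofList [("label", "accuracy summary"),
       ("description", "Descriptive p(correct)-by-strength fit over accuracy summary points.")]),
    ("condition_rate",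
      PySem.Dict.ofList [("label", "condition-rate baseline"),
       ("description", "Condition-invariant Bernoulli response-rate baseline for categorical hit-rate findings.")]),
    ("click_summary",
      PySem.Dict.ofList [("label", "click summary"),
       ("description", "Click-accumulator fit over curated click summary fields rather than a full raw-event likelihood.")]) ]

-- ===== PORT A =====
def ordered_comparison_scopes_py (scopes : List String) : List String :=
  let scope_set : PySem.Set String := PySem.Set.ofList scopes
  -- list comprehension over the dict (= over its keys) with the membership test
  let ordered : List String :=
    (PySem.Dict.keys pvScopeDefs).foldl
      (fun acc scope => if PySem.Set.contains scope_set scope then acc ++ [scope] else acc) []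
  ordered ++ PySem.List.sorted
    (PySem.Set.diff scope_set (PySem.Set.ofList ordered)) (fun x => x)

-- ===== PORT B =====
-- _SCOPE_PRIORITY = {name: index for index, name in enumerate(MODEL_COMPARISON_SCOPE_DEFINITIONS)}
def pvScopePriority : PySem.Dict String Int :=
  (PySem.List.enumerate (PySem.Dict.keys pvScopeDefs)).foldl
    (fun d p => d.insert p.2 p.1) PySem.Dict.empty

def ordered_comparison_scopes_py_alt (scopes : List String) : List String :=
  let fallback : Int := (PySem.Dict.keys pvScopeDefs).length  -- len(MODEL_COMPARISON_SCOPE_DEFINITIONS)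
  PySem.List.sorted2 (PySem.Set.ofList scopes)
    (fun s => PySem.Dict.getD pvScopePriority s fallback) (fun s => s)

-- ===== PRECONDITION & SPEC =====
def Spec_ordered_comparison_scopes_py (scopes : List String) (out : List String) : Prop := out = ordered_comparison_scopes_py_alt scopes
instance (scopes : List String) (out : List String) : Decidable (Spec_ordered_comparison_scopes_py scopes out) := by unfold Spec_ordered_comparison_scopes_py; infer_instance

-- ===== CLAIM (what is proved, stated in full; the proofs are below) =====
def Claim_equal_ordered_comparison_scopes_py : Prop := ∀ (scopes : List String), Dom_ordered_comparison_scopes_py scopes → Spec_ordered_comparison_scopes_py scopes (ordered_comparison_scopes_py scopes)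

-- ===== LEMMAS AND PROOFS =====

-- sorted2 with linearly ordered key components is sorted under the lexicographic key
theorem pv_sorted2_eq_sorted_lex {α κ₁ κ₂ : Type} [LinearOrder κ₁] [LinearOrder κ₂]
    (xs : List α) (k1 : α → κ₁) (k2 : α → κ₂) :
    PySem.List.sorted2 xs k1 k2 = PySem.List.sorted xs (fun x => toLex (k1 x, k2 x)) := by
  unfold PySem.List.sorted2 PySem.List.sorted
  have h : (fun a b => decide (k1 a < k1 b) || (!decide (k1 b < k1 a) && decide (k2 a < k2 b)))
      = (fun a b : α => decide ((toLex (k1 a, k2 a)) < toLex (k1 b, k2 b))) := by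
    funext a b
    rcases lt_trichotomy (k1 a) (k1 b) with h | h | h
    · simp [h, Prod.Lex.lt_iff]
    · simp [h, Prod.Lex.lt_iff]
    · simp [Prod.Lex.lt_iff, not_lt_of_gt h, ne_of_gt h]
      intro hle
      exact absurd hle (not_le_of_gt h)
  simp only [h]
  rfl

-- any strictly lex-key-increasing rearrangement of xs is sorted2(xs, k1, k2)
theorem pv_sorted2_eq_of_perm_of_pairwise {α κ₁ κ₂ : Type} [LinearOrder κ₁] [LinearOrder κ₂]
    (xs ys : List α) (k1 : α → κ₁) (k2 : α → κ₂)
    (hperm : ys.Perm xs)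
    (hpw : ys.Pairwise (fun a b => k1 a < k1 b ∨ (k1 a = k1 b ∧ k2 a < k2 b))) :
    PySem.List.sorted2 xs k1 k2 = ys := by
  rw [pv_sorted2_eq_sorted_lex]
  refine PySem.List.sorted_eq_of_perm_of_pairwise_lt xs ys _ hperm ?_
  refine hpw.imp ?_
  intro a b h
  rw [Prod.Lex.lt_iff]
  simpa using h

-- the B-side key
def pvKey1 (s : String) : Int :=
  PySem.Dict.getD pvScopePriority s ((PySem.Dict.keys pvScopeDefs).length)

theorem pvKey1_of_not_mem {x : String} (h : x ∉ PySem.Dict.keys pvScopeDefs) :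
    pvKey1 x = 6 := by
  have hkeys : pvScopePriority.keys = PySem.Dict.keys pvScopeDefs := by decide
  have hnone : pvScopePriority.get? x = none := by
    rw [PySem.Dict.get?_eq_none_iff_not_mem_keys, hkeys]; exact h
  simp [pvKey1, PySem.Dict.getD, hnone]
  decide

theorem pvKey1_lt_of_mem {x : String} (h : x ∈ PySem.Dict.keys pvScopeDefs) :
    pvKey1 x < 6 := by
  have : ∀ y ∈ PySem.Dict.keys pvScopeDefs, pvKey1 y < 6 := by decide
  exact this x h

theorem ordered_comparison_scopes_py_eq (scopes : List String) :
    ordered_comparison_scopes_py scopes = ordered_comparison_scopes_py_alt scopes := by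
  unfold ordered_comparison_scopes_py ordered_comparison_scopes_py_alt
  simp only [PySem.List.foldl_append_if_eq_filter, List.nil_append]
  set S : List String := PySem.Set.ofList scopes with hS
  set O : List String :=
    (PySem.Dict.keys pvScopeDefs).filter (fun s => PySem.Set.contains S s) with hO
  have hSnodup : S.Nodup := PySem.Set.nodup_ofList scopes
  have hKnodup : (PySem.Dict.keys pvScopeDefs).Nodup := by decide
  have hOnodup : O.Nodup := List.Nodup.filter _ hKnodup
  have hOset : PySem.Set.ofList O = O := PySem.Set.ofList_eq_self_of_nodup O hOnodup
  rw [hOset]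
  set R : List String := PySem.Set.diff S O with hR
  have hRfilter : R = S.filter (fun x => !(List.contains O x)) := rfl
  have hmemO : ∀ x, x ∈ O ↔ (x ∈ PySem.Dict.keys pvScopeDefs ∧ x ∈ S) := by
    intro x
    rw [hO, List.mem_filter, PySem.Set.contains, List.contains_iff_mem]
  have hmemR : ∀ x, x ∈ R ↔ (x ∈ S ∧ x ∉ O) := by
    intro x
    rw [hRfilter, List.mem_filter, Bool.not_eq_eq_eq_not, Bool.not_true,
      ← Bool.not_eq_true, List.contains_iff_mem]
  set T : List String := PySem.List.sorted R (fun x => x) with hT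
  have hTperm : T.Perm R := PySem.List.sorted_perm R (fun x => x) false
  have hmemT : ∀ x, x ∈ T ↔ x ∈ R := fun x => hTperm.mem_iff
  -- the combined list is a permutation of S
  have hnodup : (O ++ T).Nodup := by
    refine List.Nodup.append hOnodup (hTperm.nodup_iff.mpr (List.Nodup.filter _ hSnodup)) ?_
    intro x hxO hxT
    exact ((hmemR x).mp ((hmemT x).mp hxT)).2 hxO
  have hperm : (O ++ T).Perm S := by
    rw [List.perm_ext_iff_of_nodup hnodup hSnodup]
    intro x
    constructor
    · intro hx
      rcases List.mem_append.mp hx with hx | hx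
      · exact ((hmemO x).mp hx).2
      · exact ((hmemR x).mp ((hmemT x).mp hx)).1
    · intro hx
      by_cases hxO : x ∈ O
      · exact List.mem_append.mpr (Or.inl hxO)
      · exact List.mem_append.mpr (Or.inr ((hmemT x).mpr ((hmemR x).mpr ⟨hx, hxO⟩)))
  -- the combined list is strictly increasing under the composite key
  have hnotK : ∀ x ∈ T, x ∉ PySem.Dict.keys pvScopeDefs := by
    intro x hx hk
    have hmem := (hmemR x).mp ((hmemT x).mp hx)
    exact hmem.2 ((hmemO x).mpr ⟨hk, hmem.1⟩)
  have hpw : (O ++ T).Pairwise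
      (fun a b => pvKey1 a < pvKey1 b ∨ (pvKey1 a = pvKey1 b ∧ a < b)) := by
    rw [List.pairwise_append]
    refine ⟨?_, ?_, ?_⟩
    · -- within O: priorities strictly increase along the key order
      have hKpw : (PySem.Dict.keys pvScopeDefs).Pairwise (fun a b => pvKey1 a < pvKey1 b) := by
        decide
      exact (List.Pairwise.sublist List.filter_sublist hKpw).imp (fun h => Or.inl h)
    · -- within T: all keys are the fallback 6, names strictly increase
      have hle : T.Pairwise (fun a b : String => a ≤ b) := PySem.List.sorted_pairwise R (fun x => x)
      have hne : T.Nodup := hTperm.nodup_iff.mpr (List.Nodup.filter _ hSnodup)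
      have hlt : T.Pairwise (fun a b : String => a < b) :=
        (hle.and hne).imp (fun h => lt_of_le_of_ne h.1 h.2)
      refine List.Pairwise.imp_of_mem ?_ hlt
      intro a b ha hb hab
      exact Or.inr ⟨by rw [pvKey1_of_not_mem (hnotK a ha), pvKey1_of_not_mem (hnotK b hb)], hab⟩
    · -- across: a known scope sorts strictly before any unknown one
      intro a ha b hb
      exact Or.inl (by
        rw [pvKey1_of_not_mem (hnotK b hb)]
        exact pvKey1_lt_of_mem ((hmemO a).mp ha).1)
  exact (pv_sorted2_eq_of_perm_of_pairwise S (O ++ T) pvKey1 (fun s => s) hperm hpw).symm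

-- ===== VERDICT (by name: the statement is the Claim_ definition above) =====
theorem ordered_comparison_scopes_py_spec : Claim_equal_ordered_comparison_scopes_py := by
  intro scopes _
  unfold Spec_ordered_comparison_scopes_py
  exact ordered_comparison_scopes_py_eq scopes
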